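-- pv_equiv track=rewrite | github.com/Guan-JW/Metric_Study | zFigures/manifest_uncertainty/capacity.py | cal_param_count
-- ===== SOURCE A (Python) =====
-- def cal_param_count(config_dict):
--     param_count = 0
--     for key in config_dict.keys():
--         edge = config_dict[key]
--         if edge == 'nor_conv_1x1':
--             param_count += 1 * 1 * (16 * 16 + 32 * 32 + 64 * 64) * 5
--         elif edge == 'nor_conv_3x3':
--             param_count += 3 * 3 * (16 * 16 + 32 * 32 + 64 * 64) * 5
--     return param_count
-- ===== SOURCE B (Python) =====
-- WEIGHTS = {'nor_conv_1x1': 26880, 'nor_conv_3x3': 241920}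
--
-- def _total(items):
--     # divide and conquer: split the item list in half and add the halves
--     if len(items) == 0:
--         return 0
--     if len(items) == 1:
--         return WEIGHTS.get(items[0][1], 0)
--     mid = len(items) // 2
--     return _total(items[:mid]) + _total(items[mid:])
--
-- def cal_param_count(config_dict):
--     return _total(list(config_dict.items()))
-- ===== Notes on version B (the rewrite author's own statement) =====
-- stated objective: alternative
-- what changed: B replaces A's linear accumulating loop with a divide-and-conquer recursion over the item list, halving it until single items, whose contribution comes from a precomputed weight table (26880/241920), and summing the halves.
import Mathlib
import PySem

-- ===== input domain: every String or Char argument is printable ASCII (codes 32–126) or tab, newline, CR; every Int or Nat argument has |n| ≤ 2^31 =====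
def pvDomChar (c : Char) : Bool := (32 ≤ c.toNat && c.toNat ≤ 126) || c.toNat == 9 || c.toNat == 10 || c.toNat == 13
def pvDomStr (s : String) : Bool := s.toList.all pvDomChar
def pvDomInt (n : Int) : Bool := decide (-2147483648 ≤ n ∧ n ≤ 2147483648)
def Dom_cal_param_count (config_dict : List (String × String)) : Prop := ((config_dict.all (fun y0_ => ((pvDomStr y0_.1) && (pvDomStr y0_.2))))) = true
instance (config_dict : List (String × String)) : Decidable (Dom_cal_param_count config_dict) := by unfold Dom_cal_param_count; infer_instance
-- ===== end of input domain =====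

-- B replaces A's linear accumulating loop with a divide-and-conquer recursion over the
-- item list (halving until single items, weight-table lookup at the leaves); objective: alternative.

-- ===== PORT A =====
def cal_param_count (config_dict : List (String × String)) : Int :=
  let d := PySem.Dict.ofList config_dict
  d.keys.foldl (fun param_count key =>
    let edge := d.getD key ""
    if edge = "nor_conv_1x1" then param_count + 1 * 1 * (16 * 16 + 32 * 32 + 64 * 64) * 5
    else if edge = "nor_conv_3x3" then param_count + 3 * 3 * (16 * 16 + 32 * 32 + 64 * 64) * 5
    else param_count) 0

-- ===== PORT B =====
def pvWeights : PySem.Dict String Int :=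
  PySem.Dict.ofList [("nor_conv_1x1", 26880), ("nor_conv_3x3", 241920)]

-- items[:mid] / items[mid:] with 0 ≤ mid are List.take / List.drop
def pvTotal (items : List (String × String)) : Int :=
  if items.length = 0 then 0
  else if items.length = 1 then pvWeights.getD (items.headI).2 0
  else
    let mid := items.length / 2
    pvTotal (items.take mid) + pvTotal (items.drop mid)
termination_by items.length
decreasing_by
  · simp only [List.length_take]; omega
  · simp only [List.length_drop]; omega

def cal_param_count_alt (config_dict : List (String × String)) : Int :=
  pvTotal (PySem.Dict.ofList config_dict).items

-- ===== PRECONDITION & SPEC =====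
def Spec_cal_param_count (config_dict : List (String × String)) (out : Int) : Prop := out = cal_param_count_alt config_dict
instance (config_dict : List (String × String)) (out : Int) : Decidable (Spec_cal_param_count config_dict out) := by unfold Spec_cal_param_count; infer_instance

-- ===== CLAIM =====
def Claim_equal_cal_param_count : Prop := ∀ (config_dict : List (String × String)), Dom_cal_param_count config_dict → Spec_cal_param_count config_dict (cal_param_count config_dict)

-- ===== LEMMAS AND PROOFS =====
theorem pvWeights_getD (x : String) :
    pvWeights.getD x 0 = (if x = "nor_conv_1x1" then (26880 : Int)
      else if x = "nor_conv_3x3" then 241920 else 0) := by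
  have h : pvWeights = PySem.Dict.mk [("nor_conv_1x1", 26880), ("nor_conv_3x3", 241920)] := by
    decide
  rw [h, PySem.Dict.getD_eq_get?_getD]
  simp only [PySem.Dict.get?_mk_cons, beq_iff_eq]
  have hemp : (PySem.Dict.mk ([] : List (String × Int))).get? x = none := rfl
  by_cases h1 : x = "nor_conv_1x1" <;> by_cases h2 : x = "nor_conv_3x3" <;>
    simp [h1, h2, eq_comm, hemp]

theorem pvTotal_eq (L : List (String × String)) :
    pvTotal L = ((L.map Prod.snd).count "nor_conv_1x1" : Int) * 26880
      + ((L.map Prod.snd).count "nor_conv_3x3" : Int) * 241920 := by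
  induction L using pvTotal.induct with
  | case1 L h => simp [pvTotal, List.length_eq_zero_iff.mp h]
  | case2 L h0 h1 =>
    obtain ⟨p, rfl⟩ := List.length_eq_one_iff.mp h1
    rw [pvTotal]
    simp only [List.length_singleton, if_neg (by omega : ¬(1:ℕ) = 0),
      List.headI, List.map_cons, List.map_nil]
    rw [pvWeights_getD]
    by_cases h1 : p.2 = "nor_conv_1x1" <;> by_cases h2 : p.2 = "nor_conv_3x3" <;>
      simp [h1, h2, List.count_nil]
  | case3 L h0 h1 mid ih1 ih2 =>
    rw [pvTotal]
    simp only [if_neg h0, if_neg h1]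
    rw [ih1, ih2]
    have hsplit : (L.map Prod.snd) = ((L.take mid).map Prod.snd) ++ ((L.drop mid).map Prod.snd) := by
      rw [← List.map_append, List.take_append_drop]
    rw [hsplit, List.count_append, List.count_append]
    push_cast
    ring

theorem pv_key_fold (f : String → String) (L : List String) (acc : Int) :
    L.foldl (fun param_count key =>
      if f key = "nor_conv_1x1" then param_count + 1 * 1 * (16 * 16 + 32 * 32 + 64 * 64) * 5
      else if f key = "nor_conv_3x3" then param_count + 3 * 3 * (16 * 16 + 32 * 32 + 64 * 64) * 5
      else param_count) acc
    = acc + ((L.map f).count "nor_conv_1x1" : Int) * 26880 + ((L.map f).count "nor_conv_3x3" : Int) * 241920 := by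
  induction L generalizing acc with
  | nil => simp
  | cons k t ih =>
    simp only [List.foldl_cons, List.map_cons, List.count_cons, ih]
    split_ifs with h1 h2 <;> simp_all <;> omega

theorem cal_param_count_eq (config_dict : List (String × String)) :
    cal_param_count config_dict = cal_param_count_alt config_dict := by
  unfold cal_param_count cal_param_count_alt
  have hnd := PySem.Dict.nodup_keys_ofList (κ := String) (ν := String) config_dict
  have hv := PySem.Dict.values_eq_map_keys (PySem.Dict.ofList config_dict) hnd ""
  have hvals : (PySem.Dict.ofList config_dict).items.map Prod.snd
      = (PySem.Dict.ofList config_dict).keys.map (fun k => (PySem.Dict.ofList config_dict).getD k "") := by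
    rw [← hv]; rfl
  rw [pvTotal_eq, hvals, pv_key_fold]
  omega

-- ===== VERDICT =====
theorem cal_param_count_spec : Claim_equal_cal_param_count := by
  intro config_dict _
  unfold Spec_cal_param_count
  exact cal_param_count_eq config_dict
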